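-- pv_equiv track=rewrite | github.com/jcockbain/ctci-solutions | chapter-05/Q03_flip_bit_to_win.py | longest_bit_subsequence_after_flip
-- ===== SOURCE A (Python) =====
-- def longest_bit_subsequence_after_flip(n):
--     mask = 1 << 31
--     longest = 0
--     current_with_flip = 0
--     current_without_flip = 0
--
--     while mask:
--         if mask & n:
--             current_without_flip += 1
--             current_with_flip += 1
--         else:
--             current_with_flip = current_without_flip + 1
--             current_without_flip = 0
--         longest = max(current_with_flip, longest)
--         mask >>= 1
--     return longest
-- ===== SOURCE B (Python) =====
-- def _scan_ones(bits):
--     c = 0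
--     for b in bits:
--         if b == 1:
--             c += 1
--         else:
--             break
--     return c
--
--
-- def longest_bit_subsequence_after_flip(n):
--     bits = [(n >> i) & 1 for i in range(31, -1, -1)]
--     if 0 not in bits:
--         return 32
--     best = 0
--     before = []  # bits already seen, most recent first
--     rest = bits
--     while rest:
--         b, rest = rest[0], rest[1:]
--         if b == 0:
--             best = max(best, _scan_ones(before) + 1 + _scan_ones(rest))
--         before = [b] + before
--     return best
-- ===== Notes on version B (the rewrite author's own statement) =====
-- stated objective: alternative
-- what changed: Replaced the single two-counter sliding pass over mask bits by an explicit bit-list pass that, at each zero bit, scans leftward (over a reversed-prefix stack) and rightward for consecutive ones and maximises left+1+right, with an all-ones guard returning 32.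
import Mathlib
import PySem

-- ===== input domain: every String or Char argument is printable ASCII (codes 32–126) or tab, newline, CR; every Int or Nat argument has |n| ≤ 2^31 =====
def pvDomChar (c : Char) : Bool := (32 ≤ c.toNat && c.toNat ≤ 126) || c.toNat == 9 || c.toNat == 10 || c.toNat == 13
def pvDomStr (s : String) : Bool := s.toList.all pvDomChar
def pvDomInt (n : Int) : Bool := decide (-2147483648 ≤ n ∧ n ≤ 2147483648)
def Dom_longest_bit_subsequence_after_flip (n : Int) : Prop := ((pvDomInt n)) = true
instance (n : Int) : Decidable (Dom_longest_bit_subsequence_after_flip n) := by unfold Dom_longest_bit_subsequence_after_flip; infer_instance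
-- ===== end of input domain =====

-- B replaces A's two-counter sliding pass by a per-zero bidirectional scan over the explicit bit list (objective: alternative, not faster).

-- ===== PORT A =====
-- while-loop of A with fuel: the mask starts at 2^31 and is halved each iteration, so it reaches 0
-- after exactly 32 iterations; fuel 33 therefore never runs out and the loop always exits via mask = 0.
def aLoop (n : Int) (mask longest cwf cwof : Int) : Nat → Int
  | 0 => longest
  | fuel + 1 =>
    if mask ≠ 0 then
      if PySem.Int.band mask n ≠ 0 then
        aLoop n (mask >>> 1) (max (cwf + 1) longest) (cwf + 1) (cwof + 1) fuel
      else
        aLoop n (mask >>> 1) (max (cwof + 1) longest) (cwof + 1) 0 fuel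
    else longest

def longest_bit_subsequence_after_flip (n : Int) : Int :=
  aLoop n ((1 : Int) <<< 31) 0 0 0 33

-- ===== PORT B =====
-- port of _scan_ones: count leading ones, stop at the first non-1
def scanOnes : List Int → Int
  | [] => 0
  | b :: rest => if b = 1 then 1 + scanOnes rest else 0

-- port of B's while-loop over (before, best, rest)
def bLoop (before : List Int) (best : Int) : List Int → Int
  | [] => best
  | b :: rest =>
      bLoop (b :: before)
        (if b = 0 then max best (scanOnes before + 1 + scanOnes rest) else best) rest

def longest_bit_subsequence_after_flip_alt (n : Int) : Int :=
  -- bits = [(n >> i) & 1 for i in range(31, -1, -1)]; all i in the range are ≥ 0, so i.toNat is exact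
  let bits := (PySem.List.pyRange 31 (-1) (-1)).map (fun i => PySem.Int.band (n >>> i.toNat) 1)
  if 0 ∈ bits then bLoop [] 0 bits else 32

-- ===== PRECONDITION & SPEC =====
def Spec_longest_bit_subsequence_after_flip (n : Int) (out : Int) : Prop := out = longest_bit_subsequence_after_flip_alt n
instance (n : Int) (out : Int) : Decidable (Spec_longest_bit_subsequence_after_flip n out) := by unfold Spec_longest_bit_subsequence_after_flip; infer_instance

-- ===== CLAIM (what is proved, stated in full; the proofs are below) =====
def Claim_equal_longest_bit_subsequence_after_flip : Prop := ∀ (n : Int), Dom_longest_bit_subsequence_after_flip n → Spec_longest_bit_subsequence_after_flip n (longest_bit_subsequence_after_flip n)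

-- ===== LEMMAS AND PROOFS =====

-- the i-th bit of n, Python (n >> i) & 1 ∈ {0, 1}
def pvBit (n : Int) (k : Nat) : Int := PySem.Int.mod (n >>> k) 2

-- bits k down to 0, most significant first
def bitsA (n : Int) (k : Nat) : List Int := ((List.range (k + 1)).reverse).map (pvBit n)

-- A's loop body as a step on (longest, cwf, cwof) driven by a bit
def stepA : (Int × Int × Int) → Int → (Int × Int × Int)
  | (l, c, w), b => if b = 1 then (max (c + 1) l, c + 1, w + 1) else (max (w + 1) l, w + 1, 0)

-- cwf after processing a prefix, as a function of the REVERSED prefix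
def cwfR : List Int → Int
  | [] => 0
  | b :: r => if b = 1 then cwfR r + 1 else scanOnes r + 1

-- running max of cwf over all prefixes, as a function of the REVERSED list
def bestR : List Int → Int
  | [] => 0
  | b :: r => max (cwfR (b :: r)) (bestR r)

lemma pvBit01 (n : Int) (k : Nat) : pvBit n k = 0 ∨ pvBit n k = 1 := by
  have h1 := PySem.Int.mod_nonneg (n >>> k) (b := 2) (by norm_num)
  have h2 := PySem.Int.mod_lt (n >>> k) (b := 2) (by norm_num)
  unfold pvBit; omega

lemma nat_and_pow (m k : Nat) : 2 ^ k &&& m = (m / 2 ^ k % 2) * 2 ^ k := by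
  rw [Nat.two_pow_and, Nat.testBit_eq_decide_div_mod_eq]
  rcases Nat.mod_two_eq_zero_or_one (m / 2 ^ k) with h | h <;> simp [h]

lemma mask_band (n : Int) (k : Nat) :
    (PySem.Int.band ((2 : Int) ^ k) n ≠ 0) ↔ pvBit n k = 1 := by
  have hp : 0 < 2 ^ k := Nat.two_pow_pos k
  have hcast : ((2 : Int) ^ k) = ((2 ^ k : Nat) : Int) := by push_cast; ring
  have hp' : (0 : Int) < ((2 ^ k : Nat) : Int) := by exact_mod_cast hp
  unfold pvBit
  cases n with
  | ofNat m =>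
    have e1 : PySem.Int.band ((2 : Int) ^ k) (Int.ofNat m) = ((2 ^ k &&& m : Nat) : Int) := by
      rw [hcast]; exact PySem.Int.band_natCast _ _
    have e2 : (Int.ofNat m) >>> k = ((m >>> k : Nat) : Int) := rfl
    have hdiv : m >>> k = m / 2 ^ k := Nat.shiftRight_eq_div_pow m k
    rw [e1, e2,
      show PySem.Int.mod ((m >>> k : Nat) : Int) 2 = ((m >>> k % 2 : Nat) : Int) from by
        exact_mod_cast PySem.Int.mod_natCast (m >>> k) 2]
    rw [nat_and_pow, hdiv]
    rcases Nat.mod_two_eq_zero_or_one (m / 2 ^ k) with h | h <;> rw [h]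
    · simp
    · simp only [Nat.one_mul, Nat.cast_one]
      simpa using hp.ne'
  | negSucc m =>
    have e1 : PySem.Int.band ((2 : Int) ^ k) (Int.negSucc m) = ((2 ^ k - (2 ^ k &&& m) : Nat) : Int) := by
      rw [hcast]
      show PySem.Int.band _ _ = _
      rw [PySem.Int.band]
      have h1 : (0 : Int) ≤ ((2 ^ k : Nat) : Int) := by positivity
      have h2 : ¬ (0 : Int) ≤ Int.negSucc m := by
        rw [Int.negSucc_eq]; omega
      rw [if_pos h1, if_neg h2]
      have h3 : (-(Int.negSucc m) - 1) = (m : Int) := by rw [Int.negSucc_eq]; ring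
      have h4 : ((2 ^ k : Nat) : Int).toNat = 2 ^ k := Int.toNat_natCast _
      rw [h3, h4, Int.toNat_natCast]
    have e2 : (Int.negSucc m) >>> k = Int.negSucc (m >>> k) := rfl
    have hdiv : m >>> k = m / 2 ^ k := Nat.shiftRight_eq_div_pow m k
    rw [e1, e2, PySem.Int.mod_eq_emod_of_pos (by norm_num : (0:Int) < 2), Int.negSucc_eq,
      nat_and_pow, hdiv]
    rcases Nat.mod_two_eq_zero_or_one (m / 2 ^ k) with h | h <;>
      have hc : ((m / 2 ^ k : Nat) : Int) % 2 = ((m / 2 ^ k % 2 : Nat) : Int) := by push_cast; omega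
    · rw [h] at hc ⊢
      simp only [Nat.zero_mul, Nat.sub_zero, Nat.cast_zero] at hc ⊢
      omega
    · rw [h] at hc ⊢
      simp only [Nat.one_mul, Nat.sub_self, Nat.cast_zero, Nat.cast_one] at hc ⊢
      omega

lemma shift_pow_succ (k : Nat) : ((2 : Int) ^ (k + 1)) >>> 1 = (2 : Int) ^ k := by
  have h1 : ((2 : Int) ^ (k + 1)) = ((2 ^ (k + 1) : Nat) : Int) := by push_cast; ring
  have h2 : ((2 : Int) ^ k) = ((2 ^ k : Nat) : Int) := by push_cast; ring
  rw [h1, h2]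
  have h3 : ((2 ^ (k + 1) : Nat) : Int) >>> 1 = ((2 ^ (k + 1) >>> 1 : Nat) : Int) := rfl
  rw [h3]
  congr 1
  rw [Nat.shiftRight_eq_div_pow, pow_one, pow_succ, Nat.mul_div_cancel _ (by norm_num)]

-- A's loop = fold of stepA over the bit list
lemma aLoop_eq_fold (n : Int) : ∀ (k : Nat) (l c w : Int),
    aLoop n ((2 : Int) ^ k) l c w (k + 2) = (List.foldl stepA (l, c, w) (bitsA n k)).1 := by
  intro k
  induction k with
  | zero =>
    intro l c w
    have hb := mask_band n 0
    rw [pow_zero] at hb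
    have hbits : bitsA n 0 = [pvBit n 0] := by simp [bitsA]
    have hs : ((1 : Int) >>> 1) = 0 := by decide
    rw [hbits]
    rcases pvBit01 n 0 with h0 | h0 <;> rw [h0] at hb
    · have hband : PySem.Int.band 1 n = 0 := by
        by_contra hc; exact absurd (hb.mp hc) (by norm_num)
      simp [aLoop, hband, hs, stepA, List.foldl, h0]
    · have hband : PySem.Int.band 1 n ≠ 0 := hb.mpr rfl
      simp [aLoop, hband, hs, stepA, List.foldl, h0]
  | succ k ih =>
    intro l c w
    have hb := mask_band n (k + 1)
    have hmask : ((2 : Int) ^ (k + 1)) ≠ 0 := by positivity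
    have hbits : bitsA n (k + 1) = pvBit n (k + 1) :: bitsA n k := by
      simp [bitsA, List.range_succ]
    rw [hbits]
    rcases pvBit01 n (k + 1) with h0 | h0 <;> rw [h0] at hb <;>
      simp only [List.foldl, stepA]
    · rw [show aLoop n ((2:Int)^(k+1)) l c w (k+1+2) =
        aLoop n (((2:Int)^(k+1)) >>> 1) (max (w+1) l) (w+1) 0 (k+2) from by
          rw [aLoop, if_pos hmask, if_neg (by simpa using hb)]]
      rw [shift_pow_succ, ih]
      rw [h0]
      norm_num
    · rw [show aLoop n ((2:Int)^(k+1)) l c w (k+1+2) =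
        aLoop n (((2:Int)^(k+1)) >>> 1) (max (c+1) l) (c+1) (w+1) (k+2) from by
          rw [aLoop, if_pos hmask, if_pos (hb.mpr rfl)]]
      rw [shift_pow_succ, ih]
      rw [h0]
      norm_num

-- characterisation of the fold from the start state
lemma fold_char (n : Int) (bs : List Int) (h : ∀ x ∈ bs, x = 0 ∨ x = 1) :
    List.foldl stepA (0, 0, 0) bs = (bestR bs.reverse, cwfR bs.reverse, scanOnes bs.reverse) := by
  induction bs using List.reverseRecOn with
  | nil => simp [bestR, cwfR, scanOnes]
  | append_singleton bs b ih =>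
    have hb : b = 0 ∨ b = 1 := h b (by simp)
    have h' : ∀ x ∈ bs, x = 0 ∨ x = 1 := fun x hx => h x (by simp [hx])
    rw [List.foldl_append, ih h']
    have hrev : (bs ++ [b]).reverse = b :: bs.reverse := by simp
    rw [hrev]
    rcases hb with hb | hb <;> subst hb <;>
      simp [stepA, cwfR, bestR, scanOnes] <;> omega

lemma scanOnes_all_ones (v : List Int) (h0 : 0 ∉ v) (h : ∀ x ∈ v, x = 0 ∨ x = 1) :
    scanOnes v = v.length := by
  induction v with
  | nil => simp [scanOnes]
  | cons b r ih =>
    have hb : b = 1 := by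
      rcases h b (by simp) with hb | hb
      · exact absurd (by simp [hb]) h0
      · exact hb
    subst hb
    rw [scanOnes, if_pos rfl, ih (fun hx => h0 (by simp [hx])) (fun x hx => h x (by simp [hx]))]
    simp only [List.length_cons]
    push_cast
    omega

lemma scanOnes_stop (xs v : List Int) : scanOnes (xs ++ 0 :: v) = scanOnes xs := by
  induction xs with
  | nil => simp [scanOnes]
  | cons b r ih =>
    simp only [List.cons_append, scanOnes]
    split <;> simp [ih]

lemma cwfR_all_ones (l : List Int) (h0 : 0 ∉ l) (h : ∀ x ∈ l, x = 0 ∨ x = 1) :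
    cwfR l = l.length := by
  induction l with
  | nil => simp [cwfR]
  | cons b r ih =>
    have hb : b = 1 := by
      rcases h b (by simp) with hb | hb
      · exact absurd (by simp [hb]) h0
      · exact hb
    subst hb
    rw [cwfR, if_pos rfl, ih (fun hx => h0 (by simp [hx])) (fun x hx => h x (by simp [hx]))]
    simp only [List.length_cons]
    push_cast
    omega

lemma bestR_all_ones (l : List Int) (h0 : 0 ∉ l) (h : ∀ x ∈ l, x = 0 ∨ x = 1) :
    bestR l = l.length := by
  induction l with
  | nil => simp [bestR]
  | cons b r ih =>
    have h0' : (0 : Int) ∉ r := fun hx => h0 (by simp [hx])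
    have h' : ∀ x ∈ r, x = 0 ∨ x = 1 := fun x hx => h x (by simp [hx])
    rw [bestR, ih h0' h', cwfR_all_ones (b :: r) h0 h]
    simp only [List.length_cons]
    push_cast
    omega

lemma cwfR_decomp (w ru : List Int) (h0 : 0 ∉ w) (h : ∀ x ∈ w, x = 0 ∨ x = 1) :
    cwfR (w ++ 0 :: ru) = w.length + 1 + scanOnes ru := by
  induction w with
  | nil => simp [cwfR] <;> omega
  | cons b r ih =>
    have hb : b = 1 := by
      rcases h b (by simp) with hb | hb
      · exact absurd (by simp [hb]) h0
      · exact hb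
    subst hb
    rw [List.cons_append, cwfR, if_pos rfl,
      ih (fun hx => h0 (by simp [hx])) (fun x hx => h x (by simp [hx]))]
    simp only [List.length_cons]
    push_cast
    omega

lemma bestR_decomp (w ru : List Int) (h0 : 0 ∉ w) (h : ∀ x ∈ w, x = 0 ∨ x = 1) :
    bestR (w ++ 0 :: ru) = max ((w.length : Int) + 1 + scanOnes ru) (bestR ru) := by
  induction w with
  | nil => simp [bestR, cwfR] <;> omega
  | cons b r ih =>
    have hb : b = 1 := by
      rcases h b (by simp) with hb | hb
      · exact absurd (by simp [hb]) h0
      · exact hb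
    subst hb
    have h0' : (0 : Int) ∉ r := fun hx => h0 (by simp [hx])
    have h' : ∀ x ∈ r, x = 0 ∨ x = 1 := fun x hx => h x (by simp [hx])
    have hc := cwfR_decomp (1 :: r) ru h0 h
    rw [List.cons_append] at hc
    rw [List.cons_append, bestR, ih h0' h', hc]
    simp only [List.length_cons]
    push_cast
    omega

lemma bLoop_no_zero (l : List Int) (before : List Int) (best : Int) (h0 : 0 ∉ l) :
    bLoop before best l = best := by
  induction l generalizing before best with
  | nil => rfl
  | cons b r ih =>
    have hb : b ≠ 0 := fun hx => h0 (by simp [hx])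
    rw [bLoop, if_neg hb, ih _ _ (fun hx => h0 (by simp [hx]))]

lemma bLoop_append (xs : List Int) : ∀ (before : List Int) (best : Int) (v : List Int),
    bLoop before best (xs ++ 0 :: v) =
      bLoop (xs.reverse ++ before) (bLoop before best xs) (0 :: v) := by
  induction xs with
  | nil => intro before best v; rfl
  | cons b r ih =>
    intro before best v
    rw [List.cons_append, bLoop, scanOnes_stop, ih]
    simp [bLoop]

lemma bLoop_decomp (u v : List Int) (h0 : 0 ∉ v) (h : ∀ x ∈ v, x = 0 ∨ x = 1) :
    bLoop [] 0 (u ++ 0 :: v) = max (bLoop [] 0 u) (scanOnes u.reverse + 1 + v.length) := by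
  rw [bLoop_append]
  rw [show bLoop (u.reverse ++ []) (bLoop [] 0 u) (0 :: v) =
    bLoop (0 :: (u.reverse ++ [])) (max (bLoop [] 0 u) (scanOnes (u.reverse ++ []) + 1 + scanOnes v)) v from by
      rw [bLoop, if_pos rfl]]
  rw [bLoop_no_zero v _ _ h0, scanOnes_all_ones v h0 h]
  simp

lemma last_zero (bs : List Int) (h : (0 : Int) ∈ bs) :
    ∃ u v, bs = u ++ 0 :: v ∧ (0 : Int) ∉ v := by
  induction bs using List.reverseRecOn with
  | nil => simp at h
  | append_singleton bs b ih =>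
    by_cases hb : b = 0
    · exact ⟨bs, [], by simp [hb], by simp⟩
    · have hmem : (0 : Int) ∈ bs := by
        rcases List.mem_append.mp h with h1 | h1
        · exact h1
        · simp at h1; exact absurd h1.symm hb
      obtain ⟨u, v, huv, hv⟩ := ih hmem
      exact ⟨u, v ++ [b], by rw [huv]; simp, by simp [hv]; exact fun hx => hb hx.symm⟩

lemma main_lemma (bs : List Int) (h : ∀ x ∈ bs, x = 0 ∨ x = 1) (h0 : (0 : Int) ∈ bs) :
    bestR bs.reverse = bLoop [] 0 bs := by
  suffices H : ∀ (N : Nat) (bs : List Int), bs.length ≤ N → (∀ x ∈ bs, x = 0 ∨ x = 1) →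
      (0 : Int) ∈ bs → bestR bs.reverse = bLoop [] 0 bs from H bs.length bs le_rfl h h0
  intro N
  induction N with
  | zero =>
    intro bs hlen h h0
    have : bs = [] := List.length_eq_zero_iff.mp (Nat.le_zero.mp hlen)
    subst this; simp at h0
  | succ N ih =>
    intro bs hlen h h0
    obtain ⟨u, v, rfl, hv⟩ := last_zero bs h0
    have hu01 : ∀ x ∈ u, x = 0 ∨ x = 1 := fun x hx => h x (by simp [hx])
    have hv01 : ∀ x ∈ v, x = 0 ∨ x = 1 := fun x hx => h x (by simp [hx])
    have hrev : (u ++ 0 :: v).reverse = v.reverse ++ 0 :: u.reverse := by simp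
    have hvr0 : (0 : Int) ∉ v.reverse := by simpa using hv
    have hvr01 : ∀ x ∈ v.reverse, x = 0 ∨ x = 1 := fun x hx => hv01 x (by simpa using hx)
    rw [hrev, bestR_decomp v.reverse u.reverse hvr0 hvr01, bLoop_decomp u v hv hv01]
    have hlenu : u.length ≤ N := by
      have := hlen; simp only [List.length_append, List.length_cons] at this; omega
    by_cases hu : (0 : Int) ∈ u
    · rw [ih u hlenu hu01 hu]
      simp only [List.length_reverse]
      omega
    · have hur0 : (0 : Int) ∉ u.reverse := by simpa using hu
      have hur01 : ∀ x ∈ u.reverse, x = 0 ∨ x = 1 := fun x hx => hu01 x (by simpa using hx)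
      rw [bestR_all_ones u.reverse hur0 hur01, scanOnes_all_ones u.reverse hur0 hur01,
        bLoop_no_zero u _ _ hu]
      simp only [List.length_reverse]
      omega

lemma bits_eq (n : Int) :
    (PySem.List.pyRange 31 (-1) (-1)).map (fun i => PySem.Int.band (n >>> i.toNat) 1) = bitsA n 31 := by
  have h1 : PySem.List.pyRange 31 (-1) (-1) = ((List.range 32).reverse).map (fun i : Nat => (i : Int)) := by
    decide
  rw [h1, List.map_map, bitsA]
  apply List.map_congr_left
  intro x _
  simp [Function.comp, PySem.Int.band_one, pvBit, Int.toNat_natCast, Int.shiftRight_natCast_right]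

-- ===== VERDICT (by name: the statement is the Claim_ definition above) =====
theorem longest_bit_subsequence_after_flip_spec : Claim_equal_longest_bit_subsequence_after_flip := by
  intro n _
  unfold Spec_longest_bit_subsequence_after_flip
  unfold longest_bit_subsequence_after_flip longest_bit_subsequence_after_flip_alt
  rw [show ((1 : Int) <<< 31) = (2 : Int) ^ 31 from by decide]
  rw [show (33 : Nat) = 31 + 2 from rfl, aLoop_eq_fold n 31 0 0 0]
  rw [bits_eq]
  have h01 : ∀ x ∈ bitsA n 31, x = 0 ∨ x = 1 := by
    intro x hx
    simp only [bitsA, List.mem_map] at hx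
    obtain ⟨i, _, rfl⟩ := hx
    exact pvBit01 n i
  rw [fold_char n _ h01]
  by_cases h0 : (0 : Int) ∈ bitsA n 31
  · rw [if_pos h0, main_lemma _ h01 h0]
  · rw [if_neg h0]
    have h0r : (0 : Int) ∉ (bitsA n 31).reverse := by simpa using h0
    have h01r : ∀ x ∈ (bitsA n 31).reverse, x = 0 ∨ x = 1 := fun x hx => h01 x (by simpa using hx)
    rw [bestR_all_ones _ h0r h01r]
    simp [bitsA]
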